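-- pv_equiv track=rewrite | github.com/souzaleandror/Python_InteligenciaArtificialAplicada | desafio_final - cópia.py | contador_e_juntador
-- ===== SOURCE A (Python) =====
-- def contador_e_juntador(lista_de_dicionarios):
--     contador_positivas = 0
--     contador_negativas = 0
--     contador_neutras = 0
--     lista_de_dicionarios_str = []
--
--     for dicionario in lista_de_dicionarios:
--         if dicionario['avaliacao'] == 'Positiva':
--             contador_positivas += 1
--         elif dicionario['avaliacao'] == 'Negativa':
--             contador_negativas += 1
--         else:
--             contador_neutras += 1
--
--         lista_de_dicionarios_str.append(str(dicionario))
--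
--     textos_unidos = "#####".join(lista_de_dicionarios_str)
--
--     return contador_positivas, contador_negativas, contador_neutras, textos_unidos
-- ===== SOURCE B (Python) =====
-- def contador_e_juntador(lista_de_dicionarios):
--     textos_unidos = "#####".join(str(d) for d in lista_de_dicionarios)
--     positivas = sum(1 for d in lista_de_dicionarios if d['avaliacao'] == 'Positiva')
--     negativas = sum(1 for d in lista_de_dicionarios if d['avaliacao'] == 'Negativa')
--     neutras = len(lista_de_dicionarios) - positivas - negativas
--     return positivas, negativas, neutras, textos_unidos
-- ===== Notes on version B (the rewrite author's own statement) =====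
-- stated objective: idiomatic
-- what changed: A's single fused loop maintaining three counters and a string list is split into a one-line join over a generator plus two independent counting passes, with the catch-all 'neutras' derived by subtraction from the length instead of a counter.
import Mathlib
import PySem

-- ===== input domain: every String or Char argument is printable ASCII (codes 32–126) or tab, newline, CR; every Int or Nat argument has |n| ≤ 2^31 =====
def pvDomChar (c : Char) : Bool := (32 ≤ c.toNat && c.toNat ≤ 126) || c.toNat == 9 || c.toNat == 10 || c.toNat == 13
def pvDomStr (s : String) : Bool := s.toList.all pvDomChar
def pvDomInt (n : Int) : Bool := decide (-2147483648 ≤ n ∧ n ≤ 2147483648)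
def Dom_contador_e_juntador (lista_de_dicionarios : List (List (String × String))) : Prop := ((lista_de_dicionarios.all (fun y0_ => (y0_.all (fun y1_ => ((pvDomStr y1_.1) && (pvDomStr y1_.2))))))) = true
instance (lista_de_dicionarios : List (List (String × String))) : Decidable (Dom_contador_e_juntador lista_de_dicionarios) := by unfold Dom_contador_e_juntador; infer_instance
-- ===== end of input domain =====

-- B splits A's fused loop into a join over a generator plus two counting passes ('neutras' by
-- subtraction); same O(n) cost, more idiomatic.

-- shared helper: Python's str(d) for a dict of str -> str (repr of each key/value, exact on the
-- Dom character set: quote choice, and \\ \' \" \t \n \r escapes)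
def pyCharRepr (q : Char) (c : Char) : List Char :=
  if c = '\\' then ['\\', '\\']
  else if c = q then ['\\', q]
  else if c = '\t' then ['\\', 't']
  else if c = '\n' then ['\\', 'n']
  else if c = '\r' then ['\\', 'r']
  else [c]

def pyStrReprChars (cs : List Char) : List Char :=
  let q : Char := if cs.contains '\'' && !(cs.contains '"') then '"' else '\''
  [q] ++ cs.flatMap (pyCharRepr q) ++ [q]

def pyDictRepr (d : List (String × String)) : String :=
  String.ofList (['{'] ++
    PySem.Chars.join [',', ' ']
      (d.map (fun kv => pyStrReprChars kv.1.toList ++ [':', ' '] ++ pyStrReprChars kv.2.toList))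
    ++ ['}'])

-- dict lookup d['avaliacao'] (first match; Pre_ guarantees the key is present)
def avalOf (d : List (String × String)) : String := (d.lookup "avaliacao").getD ""

-- ===== PORT A =====
def contador_e_juntador (lista_de_dicionarios : List (List (String × String))) : Int × Int × Int × String :=
  let st := lista_de_dicionarios.foldl
    (fun (st : Int × Int × Int × List String) dicionario =>
      let st' : Int × Int × Int :=
        if avalOf dicionario = "Positiva" then (st.1 + 1, st.2.1, st.2.2.1)
        else if avalOf dicionario = "Negativa" then (st.1, st.2.1 + 1, st.2.2.1)
        else (st.1, st.2.1, st.2.2.1 + 1)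
      (st'.1, st'.2.1, st'.2.2, st.2.2.2 ++ [pyDictRepr dicionario]))
    (0, 0, 0, [])
  (st.1, st.2.1, st.2.2.1, PySem.Str.join "#####" st.2.2.2)

-- ===== PORT B =====
def contador_e_juntador_alt (lista_de_dicionarios : List (List (String × String))) : Int × Int × Int × String :=
  let textos_unidos := PySem.Str.join "#####" (lista_de_dicionarios.map pyDictRepr)
  let positivas : Int :=
    (lista_de_dicionarios.map (fun d => if avalOf d = "Positiva" then (1 : Int) else 0)).sum
  let negativas : Int :=
    (lista_de_dicionarios.map (fun d => if avalOf d = "Negativa" then (1 : Int) else 0)).sum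
  (positivas, negativas, (lista_de_dicionarios.length : Int) - positivas - negativas, textos_unidos)

-- ===== PRECONDITION & SPEC =====
-- Pre_ excludes exactly: dicts missing the key 'avaliacao' (A raises KeyError) and dicts whose
-- association list carries duplicate keys, which a Python dict cannot represent (it collapses
-- them before A ever runs, so the list is not the dict A received).
def Pre_contador_e_juntador (lista_de_dicionarios : List (List (String × String))) : Prop :=
  ∀ d ∈ lista_de_dicionarios, (d.map Prod.fst).Nodup ∧ "avaliacao" ∈ d.map Prod.fst
instance (lista_de_dicionarios : List (List (String × String))) : Decidable (Pre_contador_e_juntador lista_de_dicionarios) := by unfold Pre_contador_e_juntador; infer_instance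

def pvWitness_contador_e_juntador : (List (List (String × String))) :=
  [[("avaliacao", "Positiva")], [("avaliacao", "ruim"), ("texto", "ok")]]

def Spec_contador_e_juntador (lista_de_dicionarios : List (List (String × String))) (out : Int × Int × Int × String) : Prop := out = contador_e_juntador_alt lista_de_dicionarios
instance (lista_de_dicionarios : List (List (String × String))) (out : Int × Int × Int × String) : Decidable (Spec_contador_e_juntador lista_de_dicionarios out) := by unfold Spec_contador_e_juntador; infer_instance

-- ===== CLAIM (what is proved, stated in full; the proofs are below) =====
def Claim_equal_contador_e_juntador : Prop := ∀ (lista_de_dicionarios : List (List (String × String))), Dom_contador_e_juntador lista_de_dicionarios → Pre_contador_e_juntador lista_de_dicionarios → Spec_contador_e_juntador lista_de_dicionarios (contador_e_juntador lista_de_dicionarios)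

-- ===== LEMMAS AND PROOFS =====

-- invariant of A's loop: the four components in terms of B's three sums and map
theorem loop_inv (l : List (List (String × String))) :
    ∀ (p n u : Int) (acc : List String),
    l.foldl
      (fun (st : Int × Int × Int × List String) dicionario =>
        let st' : Int × Int × Int :=
          if avalOf dicionario = "Positiva" then (st.1 + 1, st.2.1, st.2.2.1)
          else if avalOf dicionario = "Negativa" then (st.1, st.2.1 + 1, st.2.2.1)
          else (st.1, st.2.1, st.2.2.1 + 1)
        (st'.1, st'.2.1, st'.2.2, st.2.2.2 ++ [pyDictRepr dicionario]))
      (p, n, u, acc)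
    = (p + (l.map (fun d => if avalOf d = "Positiva" then (1 : Int) else 0)).sum,
       n + (l.map (fun d => if avalOf d = "Negativa" then (1 : Int) else 0)).sum,
       u + ((l.length : Int)
            - (l.map (fun d => if avalOf d = "Positiva" then (1 : Int) else 0)).sum
            - (l.map (fun d => if avalOf d = "Negativa" then (1 : Int) else 0)).sum),
       acc ++ l.map pyDictRepr) := by
  induction l with
  | nil => intro p n u acc; simp
  | cons d l ih =>
    intro p n u acc
    simp only [List.foldl_cons, List.map_cons, List.sum_cons, List.length_cons]
    rw [ih]
    by_cases hp : avalOf d = "Positiva"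
    · refine Prod.ext ?_ (Prod.ext ?_ (Prod.ext ?_ ?_)) <;> simp [hp] <;> push_cast <;> omega
    · by_cases hn : avalOf d = "Negativa"
      · refine Prod.ext ?_ (Prod.ext ?_ (Prod.ext ?_ ?_)) <;> simp [hp, hn] <;> push_cast <;> omega
      · refine Prod.ext ?_ (Prod.ext ?_ (Prod.ext ?_ ?_)) <;> simp [hp, hn] <;> push_cast <;> omega

-- ===== VERDICT (by name: the statement is the Claim_ definition above) =====
theorem contador_e_juntador_spec : Claim_equal_contador_e_juntador := by
  intro l _hdom _hpre
  unfold Spec_contador_e_juntador contador_e_juntador contador_e_juntador_alt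
  rw [loop_inv l 0 0 0 []]
  simp
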